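-- pv_equiv track=rewrite | github.com/cloutsocks/actor-bot | bot/jam.py | melody_as_text
-- ===== SOURCE A (Python) =====
-- def melody_as_text(melody, ticks):
--     if not melody:
--         return 'None'
--
--     chunks = []
--     for i in range(0, len(melody), ticks):
--         chunk = ''
--         for j in range(i, min(len(melody), i+ticks)):
--             if len(melody[j]) == 1:
--                 chunk += melody[j]
--             else:
--                 chunk += f"[{melody[j]}]"
--
--         chunks.append(f'`{chunk}`')
--
--     # chunks = [f'`{melody[i:i + ticks]}`' for i in range(0, len(melody), ticks)]
--     return ' '.join(chunks)
-- ===== SOURCE B (Python) =====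
-- def melody_as_text(melody, ticks):
--     if not melody:
--         return 'None'
--     tokens = [m if len(m) == 1 else f'[{m}]' for m in melody]
--     return ' '.join(f"`{''.join(tokens[i:i + ticks])}`"
--                     for i in range(0, len(tokens), ticks))
-- ===== Notes on version B (the rewrite author's own statement) =====
-- stated objective: idiomatic
-- what changed: Replaces the hand-rolled nested accumulation loops by a map-then-chunk pipeline: one pass tokenises every note, a second pass slices the token list into ticks-sized chunks and joins them.
import Mathlib
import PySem

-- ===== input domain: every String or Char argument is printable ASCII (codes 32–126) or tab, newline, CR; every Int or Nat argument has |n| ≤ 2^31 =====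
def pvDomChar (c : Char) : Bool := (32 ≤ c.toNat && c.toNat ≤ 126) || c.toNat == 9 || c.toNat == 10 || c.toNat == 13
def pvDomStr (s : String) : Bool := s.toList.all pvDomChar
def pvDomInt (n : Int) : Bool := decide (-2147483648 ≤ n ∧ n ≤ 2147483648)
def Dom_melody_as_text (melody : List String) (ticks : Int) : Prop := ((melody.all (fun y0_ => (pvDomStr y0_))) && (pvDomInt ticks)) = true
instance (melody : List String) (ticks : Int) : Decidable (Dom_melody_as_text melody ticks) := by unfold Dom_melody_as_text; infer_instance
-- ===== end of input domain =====

-- B replaces A's nested accumulation loops by a map-then-chunk pipeline (tokenise once, then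
-- slice into ticks-sized chunks and join); same cost, different decomposition.

-- ===== PORT A =====
def melody_as_text (melody : List String) (ticks : Int) : String :=
  if melody = [] then "None"
  else
    let chunks :=
      (PySem.List.pyRange 0 (PySem.List.len melody) ticks).foldl
        (fun chunks i =>
          let chunk :=
            (PySem.List.pyRange i (min (PySem.List.len melody) (i + ticks))).foldl
              (fun chunk j =>
                let mj := PySem.List.pyGetD melody j ""
                if PySem.Str.len mj = 1 then chunk ++ mj
                else chunk ++ ("[" ++ mj ++ "]"))
              ""
          chunks ++ ["`" ++ chunk ++ "`"])
        []
    PySem.Str.join " " chunks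

-- ===== PORT B =====
def melody_as_text_alt (melody : List String) (ticks : Int) : String :=
  if melody = [] then "None"
  else
    let tokens := melody.map (fun m => if PySem.Str.len m = 1 then m else "[" ++ m ++ "]")
    PySem.Str.join " "
      ((PySem.List.pyRange 0 (PySem.List.len tokens) ticks).map
        (fun i => "`" ++ PySem.Str.join "" (PySem.List.slice tokens (some i) (some (i + ticks))) ++ "`"))

-- ===== PRECONDITION & SPEC =====
-- Pre_ excludes exactly the inputs where Python A raises: range(0, len(melody), 0) is a
-- ValueError, so a non-empty melody needs ticks ≠ 0 (B raises there too).
def Pre_melody_as_text (melody : List String) (ticks : Int) : Prop :=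
  melody = [] ∨ ticks ≠ 0
instance (melody : List String) (ticks : Int) : Decidable (Pre_melody_as_text melody ticks) := by
  unfold Pre_melody_as_text; infer_instance

def pvWitness_melody_as_text : List String × Int := (["c", "e4", "g"], 2)

def Spec_melody_as_text (melody : List String) (ticks : Int) (out : String) : Prop := out = melody_as_text_alt melody ticks
instance (melody : List String) (ticks : Int) (out : String) : Decidable (Spec_melody_as_text melody ticks out) := by unfold Spec_melody_as_text; infer_instance

-- ===== CLAIM (what is proved, stated in full; the proofs are below) =====
def Claim_equal_melody_as_text : Prop := ∀ (melody : List String) (ticks : Int), Dom_melody_as_text melody ticks → Pre_melody_as_text melody ticks → Spec_melody_as_text melody ticks (melody_as_text melody ticks)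

-- ===== LEMMAS AND PROOFS =====

-- ''.join over a cons: Chars.join with the empty separator is plain concatenation.
theorem pv_join_empty_cons (x : String) (xs : List String) :
    PySem.Str.join "" (x :: xs) = x ++ PySem.Str.join "" xs := by
  apply String.toList_injective
  simp only [PySem.Str.toList_join, List.map_cons, String.toList_append]
  cases xs with
  | nil => simp [PySem.Chars.join_singleton, PySem.Chars.join_nil]
  | cons y ys =>
    rw [List.map_cons, PySem.Chars.join_cons_cons]; simp


-- A += accumulation loop is acc ++ ''.join(map f l).
theorem pv_foldl_append_join (f : Int → String) (l : List Int) (acc : String) :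
    l.foldl (fun a j => a ++ f j) acc = acc ++ PySem.Str.join "" (l.map f) := by
  induction l generalizing acc with
  | nil =>
    apply String.toList_injective
    simp [PySem.Str.toList_join, PySem.Chars.join_nil]
  | cons x xs ih =>
    simp only [List.foldl_cons, List.map_cons, pv_join_empty_cons, ih]
    apply String.toList_injective; simp


-- A's tokenised inner chunk equals B's slice-join, for 0 <= i < len, 0 < ticks.
theorem pv_chunk_eq (melody : List String) (ticks i : Int)
    (ht : 0 < ticks) (hi : 0 ≤ i) (hin : i < PySem.List.len melody) :
    (PySem.List.pyRange i (min (PySem.List.len melody) (i + ticks))).foldl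
      (fun chunk j =>
        let mj := PySem.List.pyGetD melody j ""
        if PySem.Str.len mj = 1 then chunk ++ mj
        else chunk ++ ("[" ++ mj ++ "]"))
      "" =
    PySem.Str.join ""
      (PySem.List.slice
        (melody.map (fun m => if PySem.Str.len m = 1 then m else "[" ++ m ++ "]"))
        (some i) (some (i + ticks))) := by
  set tok : String → String := fun m => if PySem.Str.len m = 1 then m else "[" ++ m ++ "]" with htok
  have hbody : (fun (chunk : String) (j : Int) =>
        let mj := PySem.List.pyGetD melody j ""
        if PySem.Str.len mj = 1 then chunk ++ mj
        else chunk ++ ("[" ++ mj ++ "]")) =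
      (fun chunk j => chunk ++ tok (PySem.List.pyGetD melody j "")) := by
    funext chunk j
    simp only [htok]
    split <;> rfl
  rw [hbody, pv_foldl_append_join]
  have hemp : ∀ s : String, "" ++ s = s := by
    intro s; apply String.toList_injective; simp
  rw [hemp]
  congr 1
  -- map over range = slice
  have hmapget : ∀ j : Int, tok (PySem.List.pyGetD melody j "") =
      PySem.List.pyGetD (melody.map tok) j (tok "") :=
    fun j => (PySem.List.pyGetD_map tok melody j "").symm
  simp only [hmapget]
  have hlen : PySem.List.len (melody.map tok) = PySem.List.len melody := by
    simp [PySem.List.len_eq]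
  rw [PySem.List.slice_toNat _ hi (by omega)]
  have hsplit := PySem.List.pyRange_one_append i (min (PySem.List.len melody) (i + ticks))
      (PySem.List.len melody) (by omega) (by omega)
  have hfull := PySem.List.map_pyGetD_pyRange (melody.map tok) (tok "") hi
  rw [hlen, hsplit, List.map_append] at hfull
  by_cases hle : i + ticks ≤ PySem.List.len melody
  · have hm : min (PySem.List.len melody) (i + ticks) = i + ticks := by omega
    rw [hm] at hfull ⊢
    rw [← hfull, List.take_left']
    simp [PySem.List.length_pyRange_one]
    omega
  · have hm : min (PySem.List.len melody) (i + ticks) = PySem.List.len melody := by omega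
    rw [hm] at hfull ⊢
    rw [PySem.List.pyRange_one_eq_nil (le_refl _)] at hfull
    simp only [List.map_nil, List.append_nil] at hfull
    rw [← hfull]
    symm
    apply List.take_of_length_le
    simp [PySem.List.length_pyRange_one]
    have := PySem.List.len_eq melody
    omega


-- the two ports agree on every input admitted by Pre_.
theorem pv_main (melody : List String) (ticks : Int) (hpre : melody = [] ∨ ticks ≠ 0) :
    melody_as_text melody ticks = melody_as_text_alt melody ticks := by
  by_cases hm : melody = []
  · simp [melody_as_text, melody_as_text_alt, hm]
  · have ht0 : ticks ≠ 0 := hpre.resolve_left hm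
    unfold melody_as_text melody_as_text_alt
    rw [if_neg hm, if_neg hm]
    dsimp only
    have hlen : PySem.List.len (melody.map (fun m => if PySem.Str.len m = 1 then m else "[" ++ m ++ "]")) = PySem.List.len melody := by
      simp [PySem.List.len_eq]
    rw [hlen]
    have hfold := PySem.List.foldl_append_singleton_eq_map
      (fun i => "`" ++ ((PySem.List.pyRange i (min (PySem.List.len melody) (i + ticks))).foldl
              (fun chunk j =>
                let mj := PySem.List.pyGetD melody j ""
                if PySem.Str.len mj = 1 then chunk ++ mj
                else chunk ++ ("[" ++ mj ++ "]"))
              "") ++ "`")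
      (PySem.List.pyRange 0 (PySem.List.len melody) ticks) []
    rw [List.nil_append] at hfold
    rw [hfold]
    congr 1
    apply List.map_congr_left
    intro i hi
    rcases lt_trichotomy ticks 0 with hneg | hz | hpos
    · exfalso
      have hn : 0 < PySem.List.len melody := by
        have := PySem.List.len_eq melody
        have : melody.length ≠ 0 := fun h => hm (List.eq_nil_of_length_eq_zero h)
        omega
      rw [show PySem.List.pyRange 0 (PySem.List.len melody) ticks = [] from by
        simp [PySem.List.pyRange, ht0]
        split_ifs <;> omega] at hi
      exact absurd hi (List.not_mem_nil)
    · exact absurd hz ht0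
    · rw [PySem.List.mem_pyRange_iff_of_pos hpos] at hi
      obtain ⟨h0, h1, -⟩ := hi
      rw [pv_chunk_eq melody ticks i hpos h0 h1]

-- ===== VERDICT (by name: the statement is the Claim_ definition above) =====
theorem melody_as_text_spec : Claim_equal_melody_as_text := by
  intro melody ticks _hdom hpre
  unfold Spec_melody_as_text
  exact pv_main melody ticks hpre
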